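-- pv_equiv track=rewrite | github.com/ramaniji/relations_python | partial_order.py | findCoveringRelation
-- ===== SOURCE A (Python) =====
-- def findCoveringRelation(A,   R):
--
--     C = []
--     nR = []
--     for k in range(len(R)):
--         if(R[k][0] != R[k][1]):
--             nR.append([R[k][0],  R[k][1]])
--     for j in range(len(nR)):
--         e = nR[j][0]
--         f = nR[j][1]
--         s = 0
--         for i in range(len(A)):
--             if([e,  A[i]] in nR and [A[i],  f] in nR):
--                 s = s + 1
--         if(s == 0):
--             C.append([e,  f])
--     return(C)
-- ===== SOURCE B (Python) =====
-- def findCoveringRelation(A, R):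
--     nR = [(r[0], r[1]) for r in R if r[0] != r[1]]
--     T = set()
--     for a in A:
--         preds = [e for (e, x) in nR if x == a]
--         succs = [f for (x, f) in nR if x == a]
--         T.update((e, f) for e in preds for f in succs)
--     return [[e, f] for (e, f) in nR if (e, f) not in T]
-- ===== Notes on version B (the rewrite author's own statement) =====
-- stated objective: faster
-- what changed: Instead of re-scanning A and doing two linear membership scans of nR inside every pair's loop, B precomputes the composition set T = {(e,f) : e->a->f for some a in A} once (grouping predecessors/successors per middle element) and then filters nR by one O(1) set lookup per pair.
import Mathlib
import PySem

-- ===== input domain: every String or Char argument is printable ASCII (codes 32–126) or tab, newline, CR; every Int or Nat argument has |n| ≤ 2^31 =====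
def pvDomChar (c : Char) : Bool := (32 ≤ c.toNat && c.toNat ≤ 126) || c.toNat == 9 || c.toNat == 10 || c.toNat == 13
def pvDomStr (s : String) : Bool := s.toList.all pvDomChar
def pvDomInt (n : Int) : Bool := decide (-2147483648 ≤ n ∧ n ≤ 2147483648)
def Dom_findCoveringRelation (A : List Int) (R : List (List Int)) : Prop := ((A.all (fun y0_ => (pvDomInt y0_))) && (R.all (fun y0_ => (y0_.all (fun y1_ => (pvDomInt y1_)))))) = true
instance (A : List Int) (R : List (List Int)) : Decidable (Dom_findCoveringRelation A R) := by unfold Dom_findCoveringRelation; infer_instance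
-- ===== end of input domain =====

-- B precomputes the composition set T = {(e,f) : e→a→f for some a ∈ A} once and filters nR
-- by one set lookup per pair, instead of re-scanning A (with two linear scans of nR) for every pair.

-- ===== PORT A =====
def findCoveringRelation (A : List Int) (R : List (List Int)) : List (List Int) :=
  -- first loop: build nR from rows with R[k][0] != R[k][1] (pyGet? none = IndexError, excluded by Pre_)
  let nR : List (List Int) := R.foldl (fun nR r =>
    match PySem.List.pyGet? r 0, PySem.List.pyGet? r 1 with
    | some a, some b => if a ≠ b then nR ++ [[a, b]] else nR
    | _, _ => nR) []
  -- second loop over nR with the inner scan of A counting s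
  nR.foldl (fun C p =>
    let e := PySem.List.pyGetD p 0 0
    let f := PySem.List.pyGetD p 1 0
    let s : Int := A.foldl (fun s x => if [e, x] ∈ nR ∧ [x, f] ∈ nR then s + 1 else s) 0
    if s = 0 then C ++ [[e, f]] else C) []

-- ===== PORT B =====
def findCoveringRelation_alt (A : List Int) (R : List (List Int)) : List (List Int) :=
  let nR : List (Int × Int) := R.filterMap (fun r =>
    (PySem.List.pyGet? r 0).bind (fun a =>
      (PySem.List.pyGet? r 1).bind (fun b =>
        if a ≠ b then some (a, b) else none)))
  let T : PySem.Set (Int × Int) := A.foldl (fun T a =>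
    let preds := (nR.filter (fun p => p.2 == a)).map Prod.fst
    let succs := (nR.filter (fun p => p.1 == a)).map Prod.snd
    preds.foldl (fun T1 e => succs.foldl (fun T2 f => PySem.Set.add T2 (e, f)) T1) T)
    PySem.Set.empty
  (nR.filter (fun p => !(PySem.Set.contains T p))).map (fun p => [p.1, p.2])

-- ===== PRECONDITION & SPEC =====
-- Pre_: every row of R has at least two entries; on shorter rows Python A raises IndexError (R[k][0]/R[k][1]).
def Pre_findCoveringRelation (A : List Int) (R : List (List Int)) : Prop :=
  ∀ r ∈ R, 2 ≤ r.length
instance (A : List Int) (R : List (List Int)) : Decidable (Pre_findCoveringRelation A R) := by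
  unfold Pre_findCoveringRelation; infer_instance
def pvWitness_findCoveringRelation : List Int × List (List Int) :=
  ([1, 2, 3], [[1, 2], [2, 3], [1, 3], [1, 1]])

def Spec_findCoveringRelation (A : List Int) (R : List (List Int)) (out : List (List Int)) : Prop := out = findCoveringRelation_alt A R
instance (A : List Int) (R : List (List Int)) (out : List (List Int)) : Decidable (Spec_findCoveringRelation A R out) := by unfold Spec_findCoveringRelation; infer_instance

-- ===== CLAIM (what is proved, stated in full; the proofs are below) =====
def Claim_equal_findCoveringRelation : Prop := ∀ (A : List Int) (R : List (List Int)), Dom_findCoveringRelation A R → Pre_findCoveringRelation A R → Spec_findCoveringRelation A R (findCoveringRelation A R)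

-- ===== LEMMAS AND PROOFS =====

-- pair → two-element list, the shape of every element of A's nR
def pvToL (p : Int × Int) : List Int := [p.1, p.2]

-- B's T as a standalone definition (used only by the proofs; defeq to the let-bound T in the port)
def pvBuildT (A : List Int) (L : List (Int × Int)) : PySem.Set (Int × Int) :=
  A.foldl (fun T a =>
    ((L.filter (fun p => p.2 == a)).map Prod.fst).foldl
      (fun T1 e => ((L.filter (fun p => p.1 == a)).map Prod.snd).foldl
        (fun T2 f => PySem.Set.add T2 (e, f)) T1) T)
    PySem.Set.empty

-- A's first loop builds exactly B's nR, mapped to two-element lists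
theorem pv_nR_eq (R : List (List Int)) (acc : List (List Int)) :
    R.foldl (fun nR r =>
      match PySem.List.pyGet? r 0, PySem.List.pyGet? r 1 with
      | some a, some b => if a ≠ b then nR ++ [[a, b]] else nR
      | _, _ => nR) acc
    = acc ++ (R.filterMap (fun r =>
      (PySem.List.pyGet? r 0).bind (fun a =>
        (PySem.List.pyGet? r 1).bind (fun b =>
          if a ≠ b then some (a, b) else none)))).map pvToL := by
  induction R generalizing acc with
  | nil => simp
  | cons r R ih =>
    simp only [List.foldl_cons, List.filterMap_cons]
    cases h0 : PySem.List.pyGet? r 0 <;> cases h1 : PySem.List.pyGet? r 1 <;>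
      simp only [h0, h1, Option.bind_none, Option.bind_some]
    case none.none => exact ih acc
    case none.some => exact ih acc
    case some.none => exact ih acc
    case some.some a b =>
      by_cases hne : a ≠ b
      · simp only [if_pos hne]
        rw [ih]
        simp [pvToL]
      · simp only [if_neg hne]
        exact ih acc

theorem pv_mem_toL (L : List (Int × Int)) (x y : Int) :
    [x, y] ∈ L.map pvToL ↔ (x, y) ∈ L := by
  simp only [List.mem_map]
  constructor
  · rintro ⟨⟨a, b⟩, hm, he⟩
    simp [pvToL] at he
    obtain ⟨rfl, rfl⟩ := he
    exact hm
  · intro h; exact ⟨(x, y), h, rfl⟩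

-- the counting inner loop of A
theorem pv_foldl_count (c : Int → Prop) [DecidablePred c] (A : List Int) (n : Int) :
    A.foldl (fun s x => if c x then s + 1 else s) n
      = n + (A.countP (fun x => decide (c x)) : Int) := by
  induction A generalizing n with
  | nil => simp
  | cons a A ih =>
    simp only [List.foldl_cons, List.countP_cons]
    by_cases h : c a <;> simp [h, ih] <;> push_cast <;> ring

theorem pv_count_zero (c : Int → Prop) [DecidablePred c] (A : List Int) :
    A.foldl (fun s x => if c x then s + 1 else s) (0 : Int) = 0 ↔ ∀ x ∈ A, ¬ c x := by
  rw [pv_foldl_count]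
  simp [List.countP_eq_zero]

-- membership in the inner double fold building T from one middle element's preds/succs
theorem pv_mem_inner (succs : List Int) (e u v : Int) (T : PySem.Set (Int × Int)) :
    (u, v) ∈ succs.foldl (fun T2 f => PySem.Set.add T2 (e, f)) T
      ↔ (u, v) ∈ T ∨ (u = e ∧ v ∈ succs) := by
  induction succs generalizing T with
  | nil => simp
  | cons f succs ih =>
    simp only [List.foldl_cons, ih, PySem.Set.mem_add, List.mem_cons, Prod.mk.injEq]
    tauto

theorem pv_mem_double (preds succs : List Int) (u v : Int) (T : PySem.Set (Int × Int)) :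
    (u, v) ∈ preds.foldl (fun T1 e => succs.foldl (fun T2 f => PySem.Set.add T2 (e, f)) T1) T
      ↔ (u, v) ∈ T ∨ (u ∈ preds ∧ v ∈ succs) := by
  induction preds generalizing T with
  | nil => simp
  | cons e preds ih =>
    simp only [List.foldl_cons, ih, pv_mem_inner, List.mem_cons]
    tauto

theorem pv_mem_preds (L : List (Int × Int)) (a u : Int) :
    u ∈ (L.filter (fun p => p.2 == a)).map Prod.fst ↔ (u, a) ∈ L := by
  simp only [List.mem_map, List.mem_filter, beq_iff_eq]
  constructor
  · rintro ⟨⟨x, y⟩, ⟨hm, hy⟩, rfl⟩; simp at hy; simpa [hy] using hm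
  · intro h; exact ⟨(u, a), ⟨h, rfl⟩, rfl⟩

theorem pv_mem_succs (L : List (Int × Int)) (a v : Int) :
    v ∈ (L.filter (fun p => p.1 == a)).map Prod.snd ↔ (a, v) ∈ L := by
  simp only [List.mem_map, List.mem_filter, beq_iff_eq]
  constructor
  · rintro ⟨⟨x, y⟩, ⟨hm, hx⟩, rfl⟩; simp at hx; simpa [hx] using hm
  · intro h; exact ⟨(a, v), ⟨h, rfl⟩, rfl⟩

-- membership in B's full T
theorem pv_mem_T (A : List Int) (L : List (Int × Int)) (u v : Int) :
    (u, v) ∈ pvBuildT A L ↔ ∃ a ∈ A, (u, a) ∈ L ∧ (a, v) ∈ L := by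
  unfold pvBuildT
  suffices h : ∀ T : PySem.Set (Int × Int),
      (u, v) ∈ A.foldl (fun T a =>
        ((L.filter (fun p => p.2 == a)).map Prod.fst).foldl
          (fun T1 e => ((L.filter (fun p => p.1 == a)).map Prod.snd).foldl
            (fun T2 f => PySem.Set.add T2 (e, f)) T1) T) T
      ↔ (u, v) ∈ T ∨ ∃ a ∈ A, (u, a) ∈ L ∧ (a, v) ∈ L by
    rw [h PySem.Set.empty]
    simp [PySem.Set.empty]
  induction A with
  | nil => simp
  | cons a A ih =>
    intro T
    simp only [List.foldl_cons, ih, pv_mem_double, pv_mem_preds, pv_mem_succs, List.mem_cons]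
    constructor
    · rintro ((h | ⟨h1, h2⟩) | ⟨b, hb, h1, h2⟩)
      · exact Or.inl h
      · exact Or.inr ⟨a, Or.inl rfl, h1, h2⟩
      · exact Or.inr ⟨b, Or.inr hb, h1, h2⟩
    · rintro (h | ⟨b, (rfl | hb), h1, h2⟩)
      · exact Or.inl (Or.inl h)
      · exact Or.inl (Or.inr ⟨h1, h2⟩)
      · exact Or.inr ⟨b, hb, h1, h2⟩

-- A's counting condition is exactly non-membership in B's T
theorem pv_cond_iff (A : List Int) (full : List (Int × Int)) (u v : Int) :
    (A.foldl (fun s x => if [u, x] ∈ full.map pvToL ∧ [x, v] ∈ full.map pvToL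
        then s + 1 else s) (0 : Int) = 0)
      ↔ (u, v) ∉ pvBuildT A full := by
  rw [pv_count_zero, pv_mem_T]
  simp only [pv_mem_toL]
  constructor
  · rintro h ⟨a, ha, h1, h2⟩; exact h a ha ⟨h1, h2⟩
  · intro h a ha hc; exact h ⟨a, ha, hc⟩

-- A's second loop over full.map pvToL equals B's filtered map
theorem pv_outer (A : List Int) (full L : List (Int × Int)) (acc : List (List Int)) :
    (L.map pvToL).foldl (fun C p =>
      if A.foldl (fun s x =>
          if [PySem.List.pyGetD p 0 0, x] ∈ full.map pvToL ∧
             [x, PySem.List.pyGetD p 1 0] ∈ full.map pvToL then s + 1 else s) (0 : Int) = 0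
      then C ++ [[PySem.List.pyGetD p 0 0, PySem.List.pyGetD p 1 0]] else C) acc
    = acc ++ (L.filter (fun p => !((pvBuildT A full).contains p))).map (fun p => [p.1, p.2]) := by
  induction L generalizing acc with
  | nil => simp
  | cons p L ih =>
    obtain ⟨u, v⟩ := p
    have he : PySem.List.pyGetD (pvToL (u, v)) 0 0 = u := by
      simp [pvToL, PySem.List.pyGetD_zero]
    have hf : PySem.List.pyGetD (pvToL (u, v)) 1 0 = v := by
      have := PySem.List.pyGetD_natCast (xs := pvToL (u, v)) (n := 1) (d := 0)
      simpa [pvToL] using this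
    simp only [List.map_cons, List.foldl_cons, List.filter_cons, he, hf]
    by_cases hc : (u, v) ∈ pvBuildT A full
    · have hcnt : ¬ (A.foldl (fun s x =>
          if [u, x] ∈ full.map pvToL ∧ [x, v] ∈ full.map pvToL then s + 1 else s)
          (0 : Int) = 0) := by
        rw [pv_cond_iff]; exact fun h => h hc
      have hcont : ((pvBuildT A full).contains (u, v)) = true := by
        simp [PySem.Set.contains, hc]
      simp [hcnt, hcont, ih, hc]
    · have hcnt : A.foldl (fun s x =>
          if [u, x] ∈ full.map pvToL ∧ [x, v] ∈ full.map pvToL then s + 1 else s)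
          (0 : Int) = 0 := (pv_cond_iff A full u v).mpr hc
      rw [if_pos hcnt, ih]
      simp [hc]

theorem findCoveringRelation_eq (A : List Int) (R : List (List Int)) :
    findCoveringRelation A R = findCoveringRelation_alt A R := by
  unfold findCoveringRelation findCoveringRelation_alt
  set L : List (Int × Int) := R.filterMap (fun r =>
    (PySem.List.pyGet? r 0).bind (fun a =>
      (PySem.List.pyGet? r 1).bind (fun b =>
        if a ≠ b then some (a, b) else none))) with hL
  rw [pv_nR_eq, ← hL]
  simpa using pv_outer A L L []

-- ===== VERDICT (by name: the statement is the Claim_ definition above) =====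
theorem findCoveringRelation_spec : Claim_equal_findCoveringRelation := by
  intro A R _ _
  exact findCoveringRelation_eq A R
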